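-- pv_equiv track=rewrite | github.com/samfargo/townscout | scripts/analyze_telemetry.py | capture_lines
-- ===== SOURCE A (Python) =====
-- from typing import List, Pattern, Tuple
--
-- def capture_lines(
--     lines: List[str], start_token: str | None, end_token: str | None
-- ) -> List[str]:
--     capturing = start_token is None
--     captured: List[str] = []
--     for line in lines:
--         if not capturing and start_token and start_token in line:
--             capturing = True
--         if capturing:
--             captured.append(line)
--             if end_token and end_token in line:
--                 break
--     return captured
-- ===== SOURCE B (Python) =====
-- def capture_lines(lines, start_token, end_token):
--     # Locate the start index, then slice (possibly cut at the first end-token line).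
--     if start_token is None:
--         start = 0
--     elif not start_token:
--         return []
--     else:
--         start = next((i for i, l in enumerate(lines) if start_token in l), None)
--         if start is None:
--             return []
--     if end_token:
--         for j in range(start, len(lines)):
--             if end_token in lines[j]:
--                 return lines[start:j + 1]
--     return lines[start:]
-- ===== Notes on version B (the rewrite author's own statement) =====
-- stated objective: simpler
-- what changed: Replaces the stateful capturing-flag loop by a two-phase locate-then-slice: find the start index, then cut the suffix at the first end-token line.
import Mathlib
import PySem

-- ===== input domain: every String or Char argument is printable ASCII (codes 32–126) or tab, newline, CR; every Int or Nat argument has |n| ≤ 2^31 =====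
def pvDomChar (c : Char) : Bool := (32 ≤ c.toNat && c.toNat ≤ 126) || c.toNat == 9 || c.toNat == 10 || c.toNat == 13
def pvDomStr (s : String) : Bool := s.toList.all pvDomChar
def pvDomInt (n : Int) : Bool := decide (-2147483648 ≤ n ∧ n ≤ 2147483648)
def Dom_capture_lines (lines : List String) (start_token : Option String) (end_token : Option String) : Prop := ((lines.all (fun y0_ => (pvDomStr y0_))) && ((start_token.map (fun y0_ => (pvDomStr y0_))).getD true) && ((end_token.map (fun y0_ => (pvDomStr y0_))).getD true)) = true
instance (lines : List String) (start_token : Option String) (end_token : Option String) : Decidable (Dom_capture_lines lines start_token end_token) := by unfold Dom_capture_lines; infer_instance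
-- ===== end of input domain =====

-- B replaces A's stateful capturing-flag loop by locate-then-slice (simpler decomposition); same value everywhere.

-- ===== PORT A =====
-- "tok and tok in line": an Option token is truthy iff it is some non-empty string.
def pvTokIn (tok : Option String) (line : String) : Bool :=
  match tok with
  | none => false
  | some s => decide (s ≠ "") && PySem.Str.isIn s line

-- the for-loop of A, with the capturing flag as state; `break` ends the recursion.
def pvCapLoop (start_token end_token : Option String) : List String → Bool → List String
  | [], _ => []
  | line :: rest, capturing =>
    let capturing := if !capturing && pvTokIn start_token line then true else capturing
    if capturing then
      if pvTokIn end_token line then [line]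
      else line :: pvCapLoop start_token end_token rest capturing
    else pvCapLoop start_token end_token rest capturing

def capture_lines (lines : List String) (start_token : Option String) (end_token : Option String) : List String :=
  pvCapLoop start_token end_token lines start_token.isNone

-- ===== PORT B =====
-- cut the captured suffix at the first line containing a truthy end_token (inclusive)
def pvCut (end_token : Option String) (tail : List String) : List String :=
  match end_token with
  | none => tail
  | some e =>
    if e ≠ "" then
      match tail.findIdx? (fun l => PySem.Str.isIn e l) with
      | some j => tail.take (j + 1)
      | none => tail
    else tail

def capture_lines_alt (lines : List String) (start_token : Option String) (end_token : Option String) : List String :=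
  match (match start_token with
         | none => some 0
         | some s => if s = "" then none else lines.findIdx? (fun l => PySem.Str.isIn s l) : Option Nat) with
  | none => []
  | some i => pvCut end_token (lines.drop i)

-- ===== PRECONDITION & SPEC =====
def Spec_capture_lines (lines : List String) (start_token : Option String) (end_token : Option String) (out : List String) : Prop := out = capture_lines_alt lines start_token end_token
instance (lines : List String) (start_token : Option String) (end_token : Option String) (out : List String) : Decidable (Spec_capture_lines lines start_token end_token out) := by unfold Spec_capture_lines; infer_instance

-- ===== CLAIM (what is proved, stated in full; the proofs are below) =====
def Claim_equal_capture_lines : Prop := ∀ (lines : List String) (start_token : Option String) (end_token : Option String), Dom_capture_lines lines start_token end_token → Spec_capture_lines lines start_token end_token (capture_lines lines start_token end_token)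

-- ===== LEMMAS AND PROOFS =====

-- once capturing, A's loop is exactly B's cut
theorem pvCapLoop_true (st et : Option String) (l : List String) :
    pvCapLoop st et l true = pvCut et l := by
  induction l with
  | nil => cases et with
    | none => rfl
    | some e => simp [pvCapLoop, pvCut]
  | cons line rest ih =>
    cases et with
    | none => simp [pvCapLoop, pvCut, pvTokIn] at ih ⊢; exact ih
    | some e =>
      by_cases he : e = ""
      · subst he
        simp [pvCapLoop, pvCut, pvTokIn] at ih ⊢; exact ih
      · by_cases hin : PySem.Chars.isIn e.toList line.toList = true
        · simp [pvCapLoop, pvCut, pvTokIn, PySem.Str.isIn, he, hin, List.findIdx?_cons]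
        · simp [pvCapLoop, pvCut, pvTokIn, PySem.Str.isIn, he, hin, List.findIdx?_cons] at ih ⊢
          rw [ih]
          cases List.findIdx? (fun l => PySem.Chars.isIn e.toList l.toList) rest <;> simp

-- before capturing with a non-empty start token, A's loop is B's find-then-cut
theorem pvCapLoop_false (s : String) (hs : s ≠ "") (et : Option String) (l : List String) :
    pvCapLoop (some s) et l false =
      (match l.findIdx? (fun x => PySem.Str.isIn s x) with
       | some i => pvCut et (l.drop i)
       | none => []) := by
  induction l with
  | nil => rfl
  | cons line rest ih =>
    by_cases hin : PySem.Chars.isIn s.toList line.toList = true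
    · have : pvCapLoop (some s) et (line :: rest) false = pvCapLoop (some s) et (line :: rest) true := by
        simp [pvCapLoop, pvTokIn, PySem.Str.isIn, hs, hin]
      rw [this, pvCapLoop_true]
      simp [List.findIdx?_cons, PySem.Str.isIn, hin]
    · simp [pvCapLoop, pvTokIn, PySem.Str.isIn, hin, List.findIdx?_cons] at ih ⊢
      rw [ih]
      cases List.findIdx? (fun x => PySem.Chars.isIn s.toList x.toList) rest <;> simp

-- with an empty start token, A never starts capturing
theorem pvCapLoop_empty (et : Option String) (l : List String) :
    pvCapLoop (some "") et l false = [] := by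
  induction l with
  | nil => rfl
  | cons line rest ih => simpa [pvCapLoop, pvTokIn] using ih

-- ===== VERDICT (by name: the statement is the Claim_ definition above) =====
theorem capture_lines_spec : Claim_equal_capture_lines := by
  intro lines start_token end_token _
  unfold Spec_capture_lines capture_lines capture_lines_alt
  cases start_token with
  | none => simpa using pvCapLoop_true none end_token lines
  | some s =>
    by_cases hs : s = ""
    · subst hs
      rw [show (some "").isNone = false from rfl, pvCapLoop_empty end_token lines]
      simp
    · rw [show (some s).isNone = false from rfl, pvCapLoop_false s hs end_token lines]
      cases h : List.findIdx? (fun l => PySem.Chars.isIn s.toList l.toList) lines <;>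
        simp [hs, PySem.Str.isIn, h]
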